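-- pv_equiv track=rewrite | github.com/ululam/adventofcode | 2023/3/task3.py | collect_line_numbers
-- ===== SOURCE A (Python) =====
-- def collect_line_numbers(line: str) -> list((int, int, int)):
--     res, poses, digits = [], [], []
--     for i in range(len(line)):
--         if line[i].isdigit():
--             digits.append(line[i])
--             poses.append(i)
--         elif digits:
--             n = int(''.join(digits))
--             res.append((n, poses[0], poses[-1]))
--             digits, poses = [], []
--     # Don't forget last number in line
--     if digits:
--         n = int(''.join(digits))
--         res.append((n, poses[0], poses[-1]))
--     return res
-- ===== SOURCE B (Python) =====
-- def collect_line_numbers(line: str) -> list((int, int, int)):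
--     # Run-based scan: find each maximal digit run [i, j), slice-convert it once.
--     res = []
--     i, n = 0, len(line)
--     while i < n:
--         if line[i].isdigit():
--             j = i
--             while j < n and line[j].isdigit():
--                 j += 1
--             res.append((int(line[i:j]), i, j - 1))
--             i = j
--         else:
--             i += 1
--     return res
-- ===== Notes on version B (the rewrite author's own statement) =====
-- stated objective: alternative
-- what changed: Replaces the char-by-char loop with digit/position buffers and a boundary-flush branch by a run-based two-pointer scan that finds each maximal digit run, slices it and converts it once.
import Mathlib
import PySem

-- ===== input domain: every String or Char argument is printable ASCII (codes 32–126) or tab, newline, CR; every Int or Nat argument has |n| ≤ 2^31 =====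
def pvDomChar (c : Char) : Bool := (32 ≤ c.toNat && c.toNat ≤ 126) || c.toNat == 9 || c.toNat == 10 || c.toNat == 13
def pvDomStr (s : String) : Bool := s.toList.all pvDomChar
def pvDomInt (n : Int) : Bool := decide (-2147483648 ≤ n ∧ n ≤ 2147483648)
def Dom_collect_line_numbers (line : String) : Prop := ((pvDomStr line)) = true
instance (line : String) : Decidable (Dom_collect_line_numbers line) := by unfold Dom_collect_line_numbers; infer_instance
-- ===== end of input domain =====

-- B replaces A's char-by-char loop with digit/position buffers and a flush branch by a
-- run-based two-pointer scan (find each maximal digit run, slice and convert it once);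
-- same cost, different structure (objective: alternative).

-- ===== PORT A =====
-- the `for i in range(len(line))` loop: structural recursion over the remaining chars,
-- carrying the index i and the state (res, poses, digits) exactly as A does; the final
-- `if digits:` flush is the [] case.  `int(''.join(digits))` = PySem.Int.ofChars? digits
-- (.getD 0 is unreachable: the branch guarantees digits is a nonempty digit string);
-- poses[0] / poses[-1] = PySem.List.pyGet? poses 0 / (-1) (.getD 0 unreachable likewise).
def collectA (cs : List Char) (i : Nat) (res : List (Int × Int × Int))
    (poses : List Int) (digits : List Char) : List (Int × Int × Int) :=
  match cs with
  | [] =>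
      if digits.isEmpty then res
      else res ++ [((PySem.Int.ofChars? digits).getD 0,
                    (PySem.List.pyGet? poses 0).getD 0,
                    (PySem.List.pyGet? poses (-1)).getD 0)]
  | c :: rest =>
      if PySem.Chars.isdigit c then
        collectA rest (i + 1) res (poses ++ [(i : Int)]) (digits ++ [c])
      else if digits.isEmpty then
        collectA rest (i + 1) res poses digits
      else
        collectA rest (i + 1)
          (res ++ [((PySem.Int.ofChars? digits).getD 0,
                    (PySem.List.pyGet? poses 0).getD 0,
                    (PySem.List.pyGet? poses (-1)).getD 0)])
          [] []

def collect_line_numbers (line : String) : List (Int × Int × Int) :=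
  collectA line.toList 0 [] [] []

-- ===== PORT B =====
-- Source B's outer while: recursion over the remaining chars with absolute index i; the inner
-- `while j < n and line[j].isdigit(): j += 1` together with the slice line[i:j] is the
-- leading-digit-run split, i.e. takeWhile/dropWhile; int(line[i:j]) = PySem.Int.ofChars?
-- (.getD 0 unreachable: the run is a nonempty digit string).
def collectB (cs : List Char) (i : Nat) : List (Int × Int × Int) :=
  match cs with
  | [] => []
  | c :: rest =>
      if PySem.Chars.isdigit c then
        let run := (c :: rest).takeWhile PySem.Chars.isdigit
        ((PySem.Int.ofChars? run).getD 0, (i : Int), (i : Int) + run.length - 1)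
          :: collectB ((c :: rest).dropWhile PySem.Chars.isdigit) (i + run.length)
      else
        collectB rest (i + 1)
  termination_by cs.length
  decreasing_by
  · simp only [List.dropWhile, *]
    exact Nat.lt_succ_of_le (List.length_dropWhile_le _ _)
  · simp

def collect_line_numbers_alt (line : String) : List (Int × Int × Int) :=
  collectB line.toList 0

-- ===== PRECONDITION & SPEC =====
def Spec_collect_line_numbers (line : String) (out : List (Int × Int × Int)) : Prop := out = collect_line_numbers_alt line
instance (line : String) (out : List (Int × Int × Int)) : Decidable (Spec_collect_line_numbers line out) := by unfold Spec_collect_line_numbers; infer_instance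

-- ===== CLAIM (what is proved, stated in full; the proofs are below) =====
def Claim_equal_collect_line_numbers : Prop := ∀ (line : String), Dom_collect_line_numbers line → Spec_collect_line_numbers line (collect_line_numbers line)

-- ===== LEMMAS AND PROOFS =====

-- the poses list A carries while inside a run starting at p with n digits so far
def posesOf (p n : Nat) : List Int := (List.range' p n).map (fun k => (k : Int))

lemma posesOf_concat (p n : Nat) : posesOf p (n + 1) = posesOf p n ++ [((p + n : Nat) : Int)] := by
  simp [posesOf, List.range'_1_concat]

lemma posesOf_first (p n : Nat) :
    (PySem.List.pyGet? (posesOf p (n + 1)) 0).getD 0 = (p : Int) := by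
  simp [pysem, posesOf, List.range'_succ]

lemma posesOf_last (p n : Nat) :
    (PySem.List.pyGet? (posesOf p (n + 1)) (-1)).getD 0 = ((p + n : Nat) : Int) := by
  have h : posesOf p (n + 1) = posesOf p n ++ [((p + n : Nat) : Int)] := posesOf_concat p n
  simp [pysem, h]

-- mid-run invariant: with a nonempty pending run (digits ds, started at p), A finishes the
-- run exactly as B's run-split does, flushes the tuple, and continues with empty buffers.
lemma collectA_pending (cs : List Char) : ∀ (p : Nat) (ds : List Char) (res : List (Int × Int × Int)),
    ds ≠ [] →
    collectA cs (p + ds.length) res (posesOf p ds.length) ds =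
      collectA (cs.dropWhile PySem.Chars.isdigit)
        (p + ds.length + (cs.takeWhile PySem.Chars.isdigit).length)
        (res ++ [((PySem.Int.ofChars? (ds ++ cs.takeWhile PySem.Chars.isdigit)).getD 0,
                  (p : Int),
                  ((p + ds.length + (cs.takeWhile PySem.Chars.isdigit).length - 1 : Nat) : Int))])
        [] [] := by
  induction cs with
  | nil =>
      intro p ds res hds
      obtain ⟨n, hn⟩ : ∃ n, ds.length = n + 1 :=
        ⟨ds.length - 1, by cases ds <;> simp_all⟩
      simp [collectA, List.isEmpty_iff, hds, hn, posesOf_first, posesOf_last]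
  | cons c rest ih =>
      intro p ds res hds
      by_cases hc : PySem.Chars.isdigit c = true
      · have h2 := ih p (ds ++ [c]) res (by simp)
        simp only [List.length_append, List.length_cons, List.length_nil, List.append_assoc,
          List.singleton_append, Nat.zero_add] at h2
        simp only [collectA, hc, if_pos, List.takeWhile_cons, List.dropWhile_cons]
        rw [show posesOf p ds.length ++ [((p + ds.length : Nat) : Int)] = posesOf p (ds.length + 1) from
          (posesOf_concat p ds.length).symm]
        rw [show p + ds.length + 1 = p + (ds.length + 1) from by omega]
        rw [h2]
        simp only [List.length_cons]
        rw [show p + (ds.length + 1) + (List.takeWhile PySem.Chars.isdigit rest).length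
              = p + ds.length + ((List.takeWhile PySem.Chars.isdigit rest).length + 1) from by omega]
      · obtain ⟨n, hn⟩ : ∃ n, ds.length = n + 1 :=
          ⟨ds.length - 1, by cases ds <;> simp_all⟩
        simp [collectA, hc, List.isEmpty_iff, hds, hn,
          posesOf_first, posesOf_last]

-- main loop equivalence from an empty-buffer state
lemma collectA_eq_collectB : ∀ (n : Nat) (cs : List Char), cs.length ≤ n →
    ∀ (i : Nat) (res : List (Int × Int × Int)),
      collectA cs i res [] [] = res ++ collectB cs i := by
  intro n
  induction n with
  | zero =>
      intro cs hcs i res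
      interval_cases h : cs.length
      · simp_all [List.length_eq_zero_iff.mp h, collectA, collectB]
  | succ n ih =>
      intro cs hcs i res
      match cs with
      | [] => simp [collectA, collectB]
      | c :: rest =>
          by_cases hc : PySem.Chars.isdigit c = true
          · have hlen : ((rest).dropWhile PySem.Chars.isdigit).length ≤ n := by
              have := List.length_dropWhile_le PySem.Chars.isdigit rest
              simp only [List.length_cons] at hcs
              omega
            have hpend := collectA_pending rest i [c] res (by simp)
            have hp1 : posesOf i 1 = [(i : Int)] := by simp [posesOf]
            simp only [hp1, List.length_cons, List.length_nil, Nat.zero_add,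
              List.singleton_append] at hpend
            rw [collectA]
            simp only [hc, if_pos, List.nil_append]
            rw [hpend, ih _ hlen]
            rw [collectB]
            simp only [hc, if_pos, List.takeWhile_cons, List.dropWhile_cons,
              List.append_assoc, List.singleton_append, List.length_cons]
            congr 2
            · congr 2
              push_cast
              omega
            · congr 1
              omega
          · rw [collectB]
            simp only [hc, Bool.false_eq_true, if_false]
            rw [collectA, if_neg hc]
            simp only [List.isEmpty_nil, if_pos]
            exact ih rest (by simp only [List.length_cons] at hcs; omega) (i + 1) res

-- ===== VERDICT (by name: the statement is the Claim_ definition above) =====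
theorem collect_line_numbers_spec : Claim_equal_collect_line_numbers := by
  intro line _
  unfold Spec_collect_line_numbers collect_line_numbers collect_line_numbers_alt
  simpa using collectA_eq_collectB line.toList.length line.toList le_rfl 0 []
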